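-- pv_equiv track=rewrite | github.com/diegocastroplazas/prueba_tecnica | contrasena.py | cantidadDeHijos
-- ===== SOURCE A (Python) =====
-- def cantidadDeHijos(numeros, datos):
--
--     """De acuerdo a los dígitos y a las combinaciones, se hace un conteo de predecesores o hijos por cada dígito"""
--     numeroHijos = list()
--     for numero in numeros:
--         hijos_c = list()
--         for dato in datos:
--             try:
--                 index = dato.index(numero)
--                 hijos_c.extend(list(dato[index + 1 :]))
--             except ValueError:
--                 continue
--         numeroHijos.append((len(set(hijos_c)), numero))
--     return numeroHijos
-- ===== SOURCE B (Python) =====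
-- def cantidadDeHijos(numeros, datos):
--     """Index-table rewrite: one pass over datos builds, per distinct value, the union of the
--     elements following its first occurrence; then a lookup pass over numeros."""
--     combined = {}
--     for dato in datos:
--         for v in dict.fromkeys(dato):
--             combined[v] = combined.get(v, set()) | set(dato[dato.index(v) + 1:])
--     return [(len(combined.get(n, set())), n) for n in numeros]
-- ===== Notes on version B (the rewrite author's own statement) =====
-- stated objective: faster
-- what changed: Instead of rescanning every dato for every numero, B makes one pass over datos building a dict that maps each distinct value to the set of its successors (union over datos of the suffix after its first occurrence), then answers each numero by a single dict lookup.
import Mathlib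
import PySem

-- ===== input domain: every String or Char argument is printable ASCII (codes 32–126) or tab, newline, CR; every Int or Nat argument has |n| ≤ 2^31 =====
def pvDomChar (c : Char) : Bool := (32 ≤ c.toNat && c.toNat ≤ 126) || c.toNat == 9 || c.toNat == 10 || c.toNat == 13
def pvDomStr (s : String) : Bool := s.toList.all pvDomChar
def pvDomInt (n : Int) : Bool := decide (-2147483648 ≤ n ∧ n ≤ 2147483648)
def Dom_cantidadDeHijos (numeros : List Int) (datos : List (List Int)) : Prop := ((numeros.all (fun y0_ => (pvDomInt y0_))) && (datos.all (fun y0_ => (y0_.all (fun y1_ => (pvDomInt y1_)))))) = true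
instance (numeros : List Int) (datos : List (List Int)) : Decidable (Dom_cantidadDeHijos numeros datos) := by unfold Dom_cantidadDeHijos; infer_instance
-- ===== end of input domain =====

-- B replaces A's per-numero rescans of datos by one indexing pass over datos (a dict of
-- successor sets per distinct value) followed by a lookup pass over numeros (objective: faster).

-- ===== PORT A =====
-- hijos_c accumulated over datos for one numero: try dato.index(numero); extend with the suffix
def pvHijosA (numero : Int) (datos : List (List Int)) : List Int :=
  datos.foldl (fun hijos_c dato =>
    match PySem.List.index? dato numero with
    | some index => hijos_c ++ PySem.List.slice dato (some ((index : Int) + 1)) none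
    | none => hijos_c) []

def cantidadDeHijos (numeros : List Int) (datos : List (List Int)) : List (Int × Int) :=
  numeros.foldl (fun numeroHijos numero =>
    numeroHijos ++ [(PySem.Set.len (PySem.Set.ofList (pvHijosA numero datos)), numero)]) []

-- ===== PORT B =====
-- one dato's contribution to combined: for each v in dict.fromkeys(dato),
-- combined[v] = combined.get(v, set()) | set(dato[dato.index(v)+1:])
def pvStep (combined : PySem.Dict Int (PySem.Set Int)) (dato : List Int) :
    PySem.Dict Int (PySem.Set Int) :=
  (PySem.List.dedup dato).foldl (fun c v =>
    match PySem.List.index? dato v with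
    | some k => c.modify v PySem.Set.empty
        (fun s => PySem.Set.union s (PySem.Set.ofList (PySem.List.slice dato (some ((k : Int) + 1)) none)))
    | none => c   -- unreachable: every v of dict.fromkeys(dato) is in dato
    ) combined

def cantidadDeHijos_alt (numeros : List Int) (datos : List (List Int)) : List (Int × Int) :=
  let combined := datos.foldl pvStep PySem.Dict.empty
  numeros.map (fun n => (PySem.Set.len (combined.getD n PySem.Set.empty), n))

-- ===== PRECONDITION & SPEC =====
def Spec_cantidadDeHijos (numeros : List Int) (datos : List (List Int)) (out : List (Int × Int)) : Prop := out = cantidadDeHijos_alt numeros datos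
instance (numeros : List Int) (datos : List (List Int)) (out : List (Int × Int)) : Decidable (Spec_cantidadDeHijos numeros datos out) := by unfold Spec_cantidadDeHijos; infer_instance

-- ===== CLAIM (what is proved, stated in full; the proofs are below) =====
def Claim_equal_cantidadDeHijos : Prop := ∀ (numeros : List Int) (datos : List (List Int)), Dom_cantidadDeHijos numeros datos → Spec_cantidadDeHijos numeros datos (cantidadDeHijos numeros datos)

-- ===== LEMMAS AND PROOFS =====

-- the successor set one dato contributes to a value n (empty list if n ∉ dato)
def pvSufSet (dato : List Int) (n : Int) : PySem.Set Int :=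
  PySem.Set.ofList (match PySem.List.index? dato n with
    | some k => PySem.List.slice dato (some ((k : Int) + 1)) none
    | none => [])

theorem pvStep_eq (c : PySem.Dict Int (PySem.Set Int)) (dato : List Int) :
    pvStep c dato = (PySem.List.dedup dato).foldl
      (fun d v => d.modify v PySem.Set.empty (fun s => PySem.Set.union s (pvSufSet dato v))) c := by
  unfold pvStep
  apply PySem.List.foldl_congr_mem
  intro acc v hv
  obtain ⟨k, hk⟩ := Option.isSome_iff_exists.mp
    ((PySem.List.index?_isSome_iff dato v).mpr ((PySem.List.mem_dedup dato v).mp hv))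
  rw [PySem.List.index?_eq_idxOf?] at hk
  simp [pvSufSet, PySem.List.index?_eq_idxOf?, hk]

theorem pvFold_modify_getD_not_mem (dato : List Int) (l : List Int)
    (c : PySem.Dict Int (PySem.Set Int)) (n : Int) (hn : n ∉ l) :
    (l.foldl (fun d v => d.modify v PySem.Set.empty (fun s => PySem.Set.union s (pvSufSet dato v))) c).getD n PySem.Set.empty
      = c.getD n PySem.Set.empty := by
  induction l generalizing c with
  | nil => rfl
  | cons v l ih =>
    simp only [List.mem_cons, not_or] at hn
    rw [List.foldl_cons, ih _ hn.2, PySem.Dict.getD_modify_of_ne _ _ _ hn.1]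

theorem pvFold_modify_getD_mem (dato : List Int) (l : List Int)
    (c : PySem.Dict Int (PySem.Set Int)) (n : Int) (hnd : l.Nodup) (hn : n ∈ l) :
    (l.foldl (fun d v => d.modify v PySem.Set.empty (fun s => PySem.Set.union s (pvSufSet dato v))) c).getD n PySem.Set.empty
      = PySem.Set.union (c.getD n PySem.Set.empty) (pvSufSet dato n) := by
  induction l generalizing c with
  | nil => cases hn
  | cons v l ih =>
    rw [List.foldl_cons]
    rcases List.mem_cons.mp hn with h | h
    · subst h
      rw [pvFold_modify_getD_not_mem dato l _ n (List.nodup_cons.mp hnd).1,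
        PySem.Dict.getD_modify_self]
    · rw [ih _ (List.nodup_cons.mp hnd).2 h,
        PySem.Dict.getD_modify_of_ne _ _ _ (fun he => (List.nodup_cons.mp hnd).1 (by rw [← he]; exact h))]

theorem pvStep_getD (c : PySem.Dict Int (PySem.Set Int)) (dato : List Int) (n : Int) :
    (pvStep c dato).getD n PySem.Set.empty =
      if n ∈ dato then PySem.Set.union (c.getD n PySem.Set.empty) (pvSufSet dato n)
      else c.getD n PySem.Set.empty := by
  rw [pvStep_eq]
  by_cases h : n ∈ dato
  · rw [if_pos h]
    exact pvFold_modify_getD_mem dato _ c n (PySem.List.nodup_dedup dato)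
      ((PySem.List.mem_dedup dato n).mpr h)
  · rw [if_neg h]
    exact pvFold_modify_getD_not_mem dato _ c n (fun hc => h ((PySem.List.mem_dedup dato n).mp hc))

theorem pvCombined_mem (datos : List (List Int)) :
    ∀ (c : PySem.Dict Int (PySem.Set Int)) (n x : Int),
      x ∈ (datos.foldl pvStep c).getD n PySem.Set.empty ↔
        x ∈ c.getD n PySem.Set.empty ∨ ∃ dato ∈ datos, n ∈ dato ∧ x ∈ pvSufSet dato n := by
  induction datos with
  | nil => simp
  | cons d ds ih =>
    intro c n x
    rw [List.foldl_cons, ih]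
    by_cases h : n ∈ d
    · rw [pvStep_getD, if_pos h, PySem.Set.mem_union]
      constructor
      · rintro ((hx | hx) | hx)
        · exact Or.inl hx
        · exact Or.inr ⟨d, List.mem_cons_self .., h, hx⟩
        · obtain ⟨dato, hd, hnd, hxd⟩ := hx
          exact Or.inr ⟨dato, List.mem_cons_of_mem _ hd, hnd, hxd⟩
      · rintro (hx | ⟨dato, hd, hnd, hxd⟩)
        · exact Or.inl (Or.inl hx)
        · rcases List.mem_cons.mp hd with he | he
          · subst he; exact Or.inl (Or.inr hxd)
          · exact Or.inr ⟨dato, he, hnd, hxd⟩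
    · rw [pvStep_getD, if_neg h]
      constructor
      · rintro (hx | ⟨dato, hd, hnd, hxd⟩)
        · exact Or.inl hx
        · exact Or.inr ⟨dato, List.mem_cons_of_mem _ hd, hnd, hxd⟩
      · rintro (hx | ⟨dato, hd, hnd, hxd⟩)
        · exact Or.inl hx
        · rcases List.mem_cons.mp hd with he | he
          · exact absurd (he ▸ hnd) h
          · exact Or.inr ⟨dato, he, hnd, hxd⟩

theorem pvCombined_nodup (datos : List (List Int)) :
    ∀ (c : PySem.Dict Int (PySem.Set Int)) (n : Int),
      (c.getD n PySem.Set.empty).Nodup → ((datos.foldl pvStep c).getD n PySem.Set.empty).Nodup := by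
  induction datos with
  | nil => intro c n h; exact h
  | cons d ds ih =>
    intro c n h
    rw [List.foldl_cons]
    apply ih
    rw [pvStep_getD]
    by_cases hm : n ∈ d
    · rw [if_pos hm]; exact PySem.Set.nodup_union _ _ h
    · rw [if_neg hm]; exact h

theorem pvHijosA_fold_mem (n : Int) (datos : List (List Int)) :
    ∀ (acc : List Int) (x : Int),
      (x ∈ datos.foldl (fun hijos_c dato =>
        match PySem.List.index? dato n with
        | some index => hijos_c ++ PySem.List.slice dato (some ((index : Int) + 1)) none
        | none => hijos_c) acc) ↔
      x ∈ acc ∨ ∃ dato ∈ datos, n ∈ dato ∧ x ∈ pvSufSet dato n := by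
  induction datos with
  | nil => simp
  | cons d ds ih =>
    intro acc x
    rw [List.foldl_cons]
    cases hidx : PySem.List.index? d n with
    | none =>
      have hnd : n ∉ d := (PySem.List.index?_eq_none_iff d n).mp hidx
      simp only [ih]
      constructor
      · rintro (hx | ⟨dato, hd, hm, hxd⟩)
        · exact Or.inl hx
        · exact Or.inr ⟨dato, List.mem_cons_of_mem _ hd, hm, hxd⟩
      · rintro (hx | ⟨dato, hd, hm, hxd⟩)
        · exact Or.inl hx
        · rcases List.mem_cons.mp hd with he | he
          · exact absurd (he ▸ hm) hnd
          · exact Or.inr ⟨dato, he, hm, hxd⟩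
    | some k =>
      have hnd : n ∈ d := (PySem.List.index?_isSome_iff d n).mp (by rw [hidx]; rfl)
      have hk' : List.idxOf? n d = some k := by rw [← PySem.List.index?_eq_idxOf?]; exact hidx
      have hsuf : ∀ y : Int, y ∈ pvSufSet d n ↔ y ∈ PySem.List.slice d (some ((k : Int) + 1)) none := by
        intro y; simp [pvSufSet, PySem.List.index?_eq_idxOf?, hk', PySem.Set.mem_ofList]
      simp only [ih, List.mem_append]
      constructor
      · rintro ((hx | hx) | ⟨dato, hd, hm, hxd⟩)
        · exact Or.inl hx
        · exact Or.inr ⟨d, List.mem_cons_self .., hnd, (hsuf x).mpr hx⟩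
        · exact Or.inr ⟨dato, List.mem_cons_of_mem _ hd, hm, hxd⟩
      · rintro (hx | ⟨dato, hd, hm, hxd⟩)
        · exact Or.inl (Or.inl hx)
        · rcases List.mem_cons.mp hd with he | he
          · subst he; exact Or.inl (Or.inr ((hsuf x).mp hxd))
          · exact Or.inr ⟨dato, he, hm, hxd⟩

theorem pvPerN (datos : List (List Int)) (n : Int) :
    PySem.Set.len (PySem.Set.ofList (pvHijosA n datos)) =
      PySem.Set.len ((datos.foldl pvStep PySem.Dict.empty).getD n PySem.Set.empty) := by
  have h1 := PySem.Set.nodup_ofList (pvHijosA n datos)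
  have h2 : ((datos.foldl pvStep PySem.Dict.empty).getD n PySem.Set.empty).Nodup := by
    apply pvCombined_nodup
    rw [PySem.Dict.getD_empty]; exact List.nodup_nil
  have hm : ∀ a : Int, a ∈ PySem.Set.ofList (pvHijosA n datos) ↔
      a ∈ (datos.foldl pvStep PySem.Dict.empty).getD n PySem.Set.empty := by
    intro a
    rw [PySem.Set.mem_ofList, pvCombined_mem, PySem.Dict.getD_empty]
    unfold pvHijosA
    rw [pvHijosA_fold_mem]
    simp [PySem.Set.empty]
  have hp := (List.perm_ext_iff_of_nodup h1 h2).mpr hm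
  simp only [PySem.Set.len, hp.length_eq]

-- ===== VERDICT (by name: the statement is the Claim_ definition above) =====
theorem cantidadDeHijos_spec : Claim_equal_cantidadDeHijos := by
  intro numeros datos _
  unfold Spec_cantidadDeHijos cantidadDeHijos cantidadDeHijos_alt
  rw [PySem.List.foldl_append_singleton_eq_map
    (f := fun numero => (PySem.Set.len (PySem.Set.ofList (pvHijosA numero datos)), numero)),
    List.nil_append]
  exact List.map_congr_left (fun n _ => by rw [pvPerN])
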